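-- pv_equiv track=rewrite | github.com/qingyundou/gpLoop | add_accent.py | add_accent_p_fr
-- ===== SOURCE A (Python) =====
-- def add_accent_p_fr(p):
--     info_dict = {'hacked': False, 'hacked_ch_sh': False}
--     # confusions = {'HH': '', 'CH': 'SH', 'IH':'IY', 'UW':'AA'}
--     confusions = {'HH': '', 'CH': 'SH'}
--
--     hacked_ch_sh = False
--     p = p.split('.')
--     for i, ph in enumerate(p):
--         if ph in confusions:
--             p[i] = confusions[ph]
--             info_dict['hacked'] = True
--             if ph=='CH': info_dict['hacked_ch_sh'] = True
--     p = [ ph for ph in p if ph!='']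
--
--     return '.'.join(p), info_dict
-- ===== SOURCE B (Python) =====
-- def add_accent_p_fr(p):
--     # single left-to-right character scan; no split(): tokens are flushed at each '.'
--     out = []
--     tok = ''
--     saw_hh = False
--     saw_ch = False
--     for c in p + '.':
--         if c == '.':
--             if tok == 'HH':
--                 saw_hh = True
--             elif tok == 'CH':
--                 saw_ch = True
--                 out.append('SH')
--             elif tok != '':
--                 out.append(tok)
--             tok = ''
--         else:
--             tok += c
--     return '.'.join(out), {'hacked': saw_hh or saw_ch, 'hacked_ch_sh': saw_ch}
-- ===== Notes on version B (the rewrite author's own statement) =====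
-- stated objective: alternative
-- what changed: Replaces A's split-then-mutate-token-list loop with a single character-level scan that never calls split: it accumulates the current token, flushes it at each dot separator (mapping HH to nothing and CH to SH while recording the flags), and joins the emitted tokens.
import Mathlib
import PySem

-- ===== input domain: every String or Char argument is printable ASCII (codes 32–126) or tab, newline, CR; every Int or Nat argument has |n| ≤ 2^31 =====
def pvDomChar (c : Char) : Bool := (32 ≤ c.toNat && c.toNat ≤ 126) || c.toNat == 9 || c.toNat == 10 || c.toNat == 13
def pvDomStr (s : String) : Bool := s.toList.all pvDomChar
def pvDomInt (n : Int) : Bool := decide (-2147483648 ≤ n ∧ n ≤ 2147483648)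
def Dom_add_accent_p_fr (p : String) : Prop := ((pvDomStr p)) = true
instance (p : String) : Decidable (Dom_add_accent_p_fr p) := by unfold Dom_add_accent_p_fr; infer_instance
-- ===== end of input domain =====

-- B replaces A's split-then-mutate token loop with a single character-level scan (no split) that flushes tokens at each dot separator (objective: alternative).

-- ===== PORT A =====
-- the body of A's enumerate loop: replace a confused phoneme in place, flip the flags
def pvAStep (st : List String × PySem.Dict String Bool) (iph : Int × String) :
    List String × PySem.Dict String Bool :=
  match PySem.Dict.get? (PySem.Dict.ofList [("HH", ""), ("CH", "SH")]) iph.2 with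
  | some v =>
      let lst := PySem.List.pySetD st.1 iph.1 v
      let d := st.2.insert "hacked" true
      let d := if iph.2 == "CH" then d.insert "hacked_ch_sh" true else d
      (lst, d)
  | none => st

-- transliteration of A: split on '.', enumerate-loop mutating the list and the info dict, filter empties, join
def add_accent_p_fr (p : String) : String × (List (String × Bool)) :=
  let info0 : PySem.Dict String Bool :=
    PySem.Dict.ofList [("hacked", false), ("hacked_ch_sh", false)]
  -- p.split('.') : separator is the non-empty literal ".", so split? is always some
  let toks := (PySem.Str.split? p ".").getD []
  let res := (PySem.List.enumerate toks 0).foldl pvAStep (toks, info0)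
  let kept := res.1.filter (fun ph => ph != "")
  (PySem.Str.join "." kept, res.2.items)

-- ===== PORT B =====
-- the body of B's character loop: on '.' flush the current token (HH → flag, CH → flag + 'SH', '' dropped), else extend it
def pvBStep (st : List String × List Char × Bool × Bool) (c : Char) :
    List String × List Char × Bool × Bool :=
  if c = '.' then
    if st.2.1 = ['H','H'] then (st.1, [], true, st.2.2.2)
    else if st.2.1 = ['C','H'] then (st.1 ++ ["SH"], [], st.2.2.1, true)
    else if st.2.1 ≠ [] then (st.1 ++ [String.ofList st.2.1], [], st.2.2)
    else (st.1, [], st.2.2)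
  else (st.1, st.2.1 ++ [c], st.2.2)

-- B's return line: join the emitted tokens, build the info dict from the two flags
def pvBOut (st : List String × List Char × Bool × Bool) : String × (List (String × Bool)) :=
  (PySem.Str.join "." st.1,
   [("hacked", st.2.2.1 || st.2.2.2), ("hacked_ch_sh", st.2.2.2)])

-- transliteration of B: one pass over the characters of p + '.' (string concatenation ported char-exactly)
def add_accent_p_fr_alt (p : String) : String × (List (String × Bool)) :=
  pvBOut ((p.toList ++ ['.']).foldl pvBStep ([], [], false, false))

-- ===== PRECONDITION & SPEC =====
def Spec_add_accent_p_fr (p : String) (out : String × (List (String × Bool))) : Prop := out = add_accent_p_fr_alt p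
instance (p : String) (out : String × (List (String × Bool))) : Decidable (Spec_add_accent_p_fr p out) := by unfold Spec_add_accent_p_fr; infer_instance

-- ===== CLAIM (what is proved, stated in full; the proofs are below) =====
def Claim_equal_add_accent_p_fr : Prop := ∀ (p : String), Dom_add_accent_p_fr p → Spec_add_accent_p_fr p (add_accent_p_fr p)

-- ===== LEMMAS AND PROOFS =====

-- A's per-token replacement (HH → '', CH → 'SH', else unchanged)
def pvF (ph : String) : String := if ph = "HH" then "" else if ph = "CH" then "SH" else ph

-- the info dict as a literal
def pvMkd (h c : Bool) : PySem.Dict String Bool :=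
  PySem.Dict.mk [("hacked", h), ("hacked_ch_sh", c)]

lemma pv_mkd_insert_hacked (h c : Bool) :
    (pvMkd h c).insert "hacked" true = pvMkd true c := by
  simp [pvMkd, PySem.Dict.insert]

lemma pv_mkd_insert_ch (h c : Bool) :
    (pvMkd h c).insert "hacked_ch_sh" true = pvMkd h true := by
  simp [pvMkd, PySem.Dict.insert]

lemma pv_conf_get?_none (x : String) (h1 : x ≠ "HH") (h2 : x ≠ "CH") :
    PySem.Dict.get? (PySem.Dict.ofList [("HH", ""), ("CH", "SH")]) x = none := by
  have e : PySem.Dict.ofList [("HH", ""), ("CH", "SH")] = PySem.Dict.mk [("HH", ""), ("CH", "SH")] := rfl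
  rw [e]
  simp [PySem.Dict.get?_mk_cons, Ne.symm h1, Ne.symm h2]
  rfl

lemma pvAStep_hh (pre xs : List String) (h c : Bool) :
    pvAStep (pre ++ "HH" :: xs, pvMkd h c) ((pre.length : Int), "HH") = (pre ++ "" :: xs, pvMkd true c) := by
  unfold pvAStep
  rw [show PySem.Dict.get? (PySem.Dict.ofList [("HH", ""), ("CH", "SH")]) "HH" = some "" from rfl]
  simp [pv_mkd_insert_hacked]

lemma pvAStep_ch (pre xs : List String) (h c : Bool) :
    pvAStep (pre ++ "CH" :: xs, pvMkd h c) ((pre.length : Int), "CH") = (pre ++ "SH" :: xs, pvMkd true true) := by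
  unfold pvAStep
  rw [show PySem.Dict.get? (PySem.Dict.ofList [("HH", ""), ("CH", "SH")]) "CH" = some "SH" from rfl]
  simp [pv_mkd_insert_hacked, pv_mkd_insert_ch]

lemma pvAStep_none (st : List String × PySem.Dict String Bool) (i : Int) (x : String)
    (h1 : x ≠ "HH") (h2 : x ≠ "CH") : pvAStep st (i, x) = st := by
  unfold pvAStep
  rw [pv_conf_get?_none x h1 h2]

lemma pv_fold_spec (suf : List String) : ∀ (pre : List String) (h c : Bool),
    (PySem.List.enumerate suf (pre.length : Int)).foldl pvAStep (pre ++ suf, pvMkd h c)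
    = (pre ++ suf.map pvF,
       pvMkd (h || suf.any (fun ph => ph == "HH" || ph == "CH")) (c || suf.any (fun ph => ph == "CH"))) := by
  induction suf with
  | nil => intro pre h c; simp [PySem.List.enumerate_nil]
  | cons x xs ih =>
      intro pre h c
      rw [PySem.List.enumerate_cons, List.foldl_cons]
      by_cases hHH : x = "HH"
      · subst hHH
        rw [pvAStep_hh]
        have e1 : ((pre.length : Int) + 1) = (((pre ++ [""]).length : Int)) := by simp
        have e2 : pre ++ "" :: xs = (pre ++ [""]) ++ xs := by simp
        rw [e1, e2, ih (pre ++ [""]) true c]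
        simp [pvF]
      · by_cases hCH : x = "CH"
        · subst hCH
          rw [pvAStep_ch]
          have e1 : ((pre.length : Int) + 1) = (((pre ++ ["SH"]).length : Int)) := by simp
          have e2 : pre ++ "SH" :: xs = (pre ++ ["SH"]) ++ xs := by simp
          rw [e1, e2, ih (pre ++ ["SH"]) true true]
          simp [pvF]
        · rw [pvAStep_none _ _ _ hHH hCH]
          have e1 : ((pre.length : Int) + 1) = (((pre ++ [x]).length : Int)) := by simp
          have e2 : pre ++ x :: xs = (pre ++ [x]) ++ xs := by simp
          rw [e1, e2, ih (pre ++ [x]) h c]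
          have b1 : (x == "HH") = false := by simp [hHH]
          have b2 : (x == "CH") = false := by simp [hCH]
          simp [pvF, hHH, hCH, b1, b2]

-- A's whole computation as a function of the token list
lemma pv_a_main (toks : List String) :
    (let res := (PySem.List.enumerate toks 0).foldl pvAStep
      (toks, PySem.Dict.ofList [("hacked", false), ("hacked_ch_sh", false)])
     (PySem.Str.join "." (res.1.filter (fun ph => ph != "")), res.2.items))
    = (PySem.Str.join "." ((toks.map pvF).filter (fun ph => ph != "")),
       [("hacked", toks.any (fun ph => ph == "HH" || ph == "CH")),
        ("hacked_ch_sh", toks.any (fun ph => ph == "CH"))]) := by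
  have e0 : PySem.Dict.ofList [("hacked", false), ("hacked_ch_sh", false)] = pvMkd false false := rfl
  have hz : (0 : Int) = (([] : List String).length : Int) := by simp
  have h := pv_fold_spec toks [] false false
  simp only [List.nil_append] at h
  show (PySem.Str.join "." ((((PySem.List.enumerate toks 0).foldl pvAStep
      (toks, PySem.Dict.ofList [("hacked", false), ("hacked_ch_sh", false)])).1).filter (fun ph => ph != "")),
      ((PySem.List.enumerate toks 0).foldl pvAStep
      (toks, PySem.Dict.ofList [("hacked", false), ("hacked_ch_sh", false)])).2.items) = _
  rw [e0, hz, h]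
  simp [pvMkd]

-- ---- B side: characterise the character scan through the tokenisation of the char list ----

-- first token of cs when split at '.'
def pvSpH : List Char → List Char
  | [] => []
  | c :: r => if c = '.' then [] else c :: pvSpH r

-- remaining tokens of cs when split at '.'
def pvSpT : List Char → List (List Char)
  | [] => []
  | c :: r => if c = '.' then pvSpH r :: pvSpT r else pvSpT r

lemma pv_go_spec (cs : List Char) : ∀ (fuel : Nat) (cur : List Char) (acc : List (List Char)),
    cs.length ≤ fuel →
    PySem.Chars.splitOn.go ['.'] fuel cs cur acc
      = acc.reverse ++ (cur.reverse ++ pvSpH cs) :: pvSpT cs := by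
  induction cs with
  | nil =>
      intro fuel cur acc _
      cases fuel with
      | zero => simp [PySem.Chars.splitOn.go, pvSpH, pvSpT]
      | succ f => simp [PySem.Chars.splitOn.go, pvSpH, pvSpT]
  | cons c r ih =>
      intro fuel cur acc hle
      cases fuel with
      | zero => simp at hle
      | succ f =>
          rw [PySem.Chars.splitOn.go]
          by_cases hc : c = '.'
          · subst hc
            have hp : (['.'].isPrefixOf ('.' :: r)) = true := by simp [List.isPrefixOf]
            rw [if_pos hp]
            have : r.length ≤ f := by simpa using hle
            rw [show List.drop (['.'] : List Char).length ('.' :: r) = r from rfl,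
                ih f [] (cur.reverse :: acc) this]
            simp [pvSpH, pvSpT]
          · have hp : (['.'].isPrefixOf (c :: r)) = false := by
              simp [List.isPrefixOf]
              exact fun h => hc h.symm
            rw [if_neg (by simp [hp])]
            have : r.length ≤ f := by simpa using Nat.le_of_succ_le_succ hle
            rw [ih f (c :: cur) acc this]
            simp [pvSpH, pvSpT, hc]

lemma pv_splitOn_dot (cs : List Char) :
    PySem.Chars.splitOn cs ['.'] = pvSpH cs :: pvSpT cs := by
  unfold PySem.Chars.splitOn
  rw [pv_go_spec cs (cs.length + 1) [] [] (Nat.le_succ _)]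
  simp

lemma pv_split_toks (p : String) :
    (PySem.Str.split? p ".").getD [] = (pvSpH p.toList :: pvSpT p.toList).map String.ofList := by
  show (Option.map (fun x => List.map String.ofList x) (PySem.Chars.split? p.toList ".".toList)).getD [] = _
  rw [show (".".toList : List Char) = ['.'] from rfl]
  simp [PySem.Chars.split?, pv_splitOn_dot]

-- token-level view of B's flush
def pvTFold (st : List String × Bool × Bool) (t : List Char) : List String × Bool × Bool :=
  if t = ['H','H'] then (st.1, true, st.2.2)
  else if t = ['C','H'] then (st.1 ++ ["SH"], st.2.1, true)
  else if t ≠ [] then (st.1 ++ [String.ofList t], st.2.1, st.2.2)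
  else st

lemma pvBStep_dot (out : List String) (tok : List Char) (hh ch : Bool) :
    pvBStep (out, tok, hh, ch) '.' =
      ((pvTFold (out, hh, ch) tok).1, [], (pvTFold (out, hh, ch) tok).2) := by
  simp only [pvBStep, pvTFold]
  split_ifs <;> rfl

-- the character scan over cs + '.' is the token fold over the tokens of cs
lemma pv_scan_spec (cs : List Char) : ∀ (out : List String) (tok : List Char) (hh ch : Bool),
    (cs ++ ['.']).foldl pvBStep (out, tok, hh, ch)
      = ((((tok ++ pvSpH cs) :: pvSpT cs).foldl pvTFold (out, hh, ch)).1, [],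
         (((tok ++ pvSpH cs) :: pvSpT cs).foldl pvTFold (out, hh, ch)).2) := by
  induction cs with
  | nil =>
      intro out tok hh ch
      simp [pvSpH, pvSpT, pvBStep_dot]
  | cons c r ih =>
      intro out tok hh ch
      by_cases hc : c = '.'
      · subst hc
        have : (('.' :: r) ++ ['.']).foldl pvBStep (out, tok, hh, ch)
            = (r ++ ['.']).foldl pvBStep
                ((pvTFold (out, hh, ch) tok).1, [], (pvTFold (out, hh, ch) tok).2) := by
          simp [List.foldl_cons, pvBStep_dot]
        rw [this, ih]
        simp [pvSpH, pvSpT]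
      · have hstep : pvBStep (out, tok, hh, ch) c = (out, tok ++ [c], hh, ch) := by
          simp [pvBStep, hc]
        have : ((c :: r) ++ ['.']).foldl pvBStep (out, tok, hh, ch)
            = (r ++ ['.']).foldl pvBStep (out, tok ++ [c], hh, ch) := by
          simp [List.foldl_cons, hstep]
        rw [this, ih]
        simp [pvSpH, pvSpT, hc]

-- closed form of the token fold
lemma pv_tfold_spec (ts : List (List Char)) : ∀ (out : List String) (hh ch : Bool),
    ts.foldl pvTFold (out, hh, ch)
      = (out ++ (ts.filter (fun t => !(t == []) && !(t == ['H','H']))).map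
            (fun t => if t = ['C','H'] then "SH" else String.ofList t),
         hh || ts.any (fun t => t == ['H','H']),
         ch || ts.any (fun t => t == ['C','H'])) := by
  induction ts with
  | nil => intro out hh ch; simp
  | cons t r ih =>
      intro out hh ch
      rw [List.foldl_cons]
      by_cases h1 : t = ['H','H']
      · subst h1; simp [pvTFold, ih]
      · by_cases h2 : t = ['C','H']
        · subst h2; simp [pvTFold, ih]
        · by_cases h3 : t = []
          · subst h3; simp [pvTFold, ih]
          · have b1 : (t == ['H','H']) = false := by simp [h1]
            have b2 : (t == ['C','H']) = false := by simp [h2]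
            simp [pvTFold, h1, h2, h3, b1, b2, ih]

lemma pv_ofList_inj (t s : List Char) : (String.ofList t = String.ofList s) ↔ t = s := by
  constructor
  · intro h; have := congrArg String.toList h; simpa using this
  · intro h; rw [h]

-- bridge: A's string-level filter/map over ofList-tokens equals B's char-level one
lemma pv_bridge_list (ts : List (List Char)) :
    ((ts.map String.ofList).map pvF).filter (fun ph => ph != "")
      = (ts.filter (fun t => !(t == []) && !(t == ['H','H']))).map
          (fun t => if t = ['C','H'] then "SH" else String.ofList t) := by
  induction ts with
  | nil => rfl
  | cons t r ih =>
      have eHH : (String.ofList t = "HH") ↔ t = ['H','H'] := pv_ofList_inj t ['H','H']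
      have eCH : (String.ofList t = "CH") ↔ t = ['C','H'] := pv_ofList_inj t ['C','H']
      have eE : (String.ofList t = "") ↔ t = [] := pv_ofList_inj t []
      by_cases h1 : t = ['H','H']
      · subst h1; simpa [pvF] using ih
      · by_cases h2 : t = ['C','H']
        · subst h2; simpa [pvF] using ih
        · by_cases h3 : t = []
          · subst h3; simpa [pvF] using ih
          · have nHH : String.ofList t ≠ "HH" := fun h => h1 (eHH.mp h)
            have nCH : String.ofList t ≠ "CH" := fun h => h2 (eCH.mp h)
            have nE : String.ofList t ≠ "" := fun h => h3 (eE.mp h)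
            have bE : t.isEmpty = false := by simp [h3]
            have ih' : List.filter (fun ph => ph != "") (List.map (pvF ∘ String.ofList) r) =
                List.map (fun t => if t = ['C','H'] then "SH" else String.ofList t)
                  (List.filter (fun t => !t.isEmpty && !(t == ['H','H'])) r) := by
              simpa using ih
            simp [pvF, nHH, nCH, nE, h1, h2, bE, ih']

lemma pv_bridge_any_hh (ts : List (List Char)) :
    (ts.map String.ofList).any (fun ph => ph == "HH") = ts.any (fun t => t == ['H','H']) := by
  induction ts with
  | nil => rfl
  | cons t r ih =>
      have e : (String.ofList t == "HH") = (t == ['H','H']) := by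
        by_cases h : t = ['H','H']
        · subst h; rfl
        · have n : String.ofList t ≠ "HH" := fun hh => h ((pv_ofList_inj t ['H','H']).mp hh)
          simp [h, n]
      simp [List.any_cons, e, ih]

lemma pv_bridge_any_ch (ts : List (List Char)) :
    (ts.map String.ofList).any (fun ph => ph == "CH") = ts.any (fun t => t == ['C','H']) := by
  induction ts with
  | nil => rfl
  | cons t r ih =>
      have e : (String.ofList t == "CH") = (t == ['C','H']) := by
        by_cases h : t = ['C','H']
        · subst h; rfl
        · have n : String.ofList t ≠ "CH" := fun hh => h ((pv_ofList_inj t ['C','H']).mp hh)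
          simp [h, n]
      simp [List.any_cons, e, ih]

lemma pv_any_or_split (toks : List String) :
    toks.any (fun ph => ph == "HH" || ph == "CH")
      = (toks.any (fun ph => ph == "HH") || toks.any (fun ph => ph == "CH")) := by
  induction toks with
  | nil => rfl
  | cons x xs ih =>
      simp [List.any_cons, ih]
      cases x == "HH" <;> cases x == "CH" <;> simp

-- ===== VERDICT (by name: the statement is the Claim_ definition above) =====
theorem add_accent_p_fr_spec : Claim_equal_add_accent_p_fr := by
  intro p _
  unfold Spec_add_accent_p_fr add_accent_p_fr add_accent_p_fr_alt
  rw [pv_a_main ((PySem.Str.split? p ".").getD []), pv_split_toks p]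
  rw [pv_scan_spec p.toList [] [] false false, pv_tfold_spec]
  simp only [pvBOut, List.nil_append, Bool.false_or]
  rw [pv_bridge_list, pv_any_or_split, pv_bridge_any_hh, pv_bridge_any_ch]
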